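-- pv_equiv track=rewrite | github.com/KimuraYoichi/MyPrograms | ProjectEuler/Python/test006.py | changedigt
-- ===== SOURCE A (Python) =====
-- from functools import reduce
--
-- def changedigt(n, c):
--     candiateList = []
--     l = [int(x) for x in list(str(n))]
--     for m in range(10):
--         for i in c:
--             l[i] = m
--         candiateList.append(int(reduce(lambda x, y:x + y, [str(x) for x in l])))
--     return candiateList
-- ===== SOURCE B (Python) =====
-- def changedigt(n, c):
--     digits = [int(x) for x in str(n)]
--     mask = [False] * len(digits)
--     for i in c:
--         mask[i] = True
--     parts = [[]]
--     for d, hit in zip(digits, mask):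
--         if hit:
--             parts.append([])
--         else:
--             parts[-1].append(d)
--     result = []
--     for m in range(10):
--         seq = list(parts[0])
--         for p in parts[1:]:
--             seq.append(m)
--             seq.extend(p)
--         result.append(int(''.join(str(d) for d in seq)))
--     return result
-- ===== Notes on version B (the rewrite author's own statement) =====
-- stated objective: alternative
-- what changed: B decomposes the digit string once into the fixed segments between substituted positions (via a boolean mask) and emits each candidate by splicing the digit m into the gaps, instead of A's re-mutating the digit list for every m and re-concatenating all digit strings with reduce.
import Mathlib
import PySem

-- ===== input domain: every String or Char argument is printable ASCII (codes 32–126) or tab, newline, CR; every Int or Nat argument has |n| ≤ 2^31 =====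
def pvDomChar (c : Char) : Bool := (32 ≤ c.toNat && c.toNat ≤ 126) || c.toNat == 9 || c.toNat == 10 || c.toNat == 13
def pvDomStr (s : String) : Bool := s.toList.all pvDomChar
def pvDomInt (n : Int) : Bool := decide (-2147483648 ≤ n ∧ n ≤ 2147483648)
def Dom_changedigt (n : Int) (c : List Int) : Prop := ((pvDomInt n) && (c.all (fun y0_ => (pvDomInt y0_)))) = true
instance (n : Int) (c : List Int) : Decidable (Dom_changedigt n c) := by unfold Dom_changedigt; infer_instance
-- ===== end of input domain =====

-- B decomposes the digit list once into the fixed segments between substituted positions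
-- (marked by a boolean mask) and emits each candidate by splicing the digit m into the gaps,
-- instead of A's re-mutating the digit list for every m and reduce-concatenating digit strings
-- (objective: alternative decomposition).

-- ===== PORT A =====
-- shared line of both Pythons: [int(x) for x in str(n)]
def pvParseDigits (n : Int) : List Int :=
  (PySem.Int.toChars n).map (fun ch => (PySem.Int.ofChars? [ch]).getD 0)

-- reduce(lambda x, y: x + y, xs) on a list of strings (empty list raises in Python; never reached)
def pvReduceConcat (xs : List (List Char)) : List Char :=
  match xs with
  | [] => []
  | h :: t => t.foldl (· ++ ·) h

def changedigt (n : Int) (c : List Int) : List Int :=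
  let l0 := pvParseDigits n
  ((PySem.List.pyRange 0 10 1).foldl
    (fun st m =>
      let l := c.foldl (fun l i => PySem.List.pySetD l i m) st.2
      (st.1 ++ [(PySem.Int.ofChars? (pvReduceConcat (l.map PySem.Int.toChars))).getD 0], l))
    ([], l0)).1

-- ===== PORT B =====
-- the body of B's 'for d, hit in zip(...)' loop: either open a new segment or extend the last
def pvSegStep (parts : List (List Int)) (dh : Int × Bool) : List (List Int) :=
  if dh.2 then parts ++ [[]]
  else parts.dropLast ++ [(parts.getLast?.getD []) ++ [dh.1]]

def changedigt_alt (n : Int) (c : List Int) : List Int :=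
  let digits := pvParseDigits n
  let mask := c.foldl (fun mk i => PySem.List.pySetD mk i true)
    (List.replicate digits.length false)
  let parts := (digits.zip mask).foldl pvSegStep [[]]
  ((PySem.List.pyRange 0 10 1).foldl
    (fun result m =>
      let seq := (PySem.List.slice parts (some 1) none).foldl
        (fun seq p => (seq ++ [m]) ++ p) parts.headI
      result ++ [(PySem.Int.ofChars? (PySem.Chars.join [] (seq.map PySem.Int.toChars))).getD 0])
    [])

-- ===== PRECONDITION & SPEC =====
-- Pre_ excludes exactly where A raises: n < 0 (ValueError from int('-')) and indices in c
-- outside [-len(str(n)), len(str(n))) (IndexError from l[i] = m).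
def Pre_changedigt (n : Int) (c : List Int) : Prop :=
  0 ≤ n ∧ ∀ i ∈ c, PySem.Raise.InRange (PySem.Int.toChars n).length i
instance (n : Int) (c : List Int) : Decidable (Pre_changedigt n c) := by unfold Pre_changedigt; infer_instance
def pvWitness_changedigt : Int × List Int := (123, [0, -1])

def Spec_changedigt (n : Int) (c : List Int) (out : List Int) : Prop := out = changedigt_alt n c
instance (n : Int) (c : List Int) (out : List Int) : Decidable (Spec_changedigt n c out) := by unfold Spec_changedigt; infer_instance

-- ===== CLAIM (what is proved, stated in full; the proofs are below) =====
def Claim_equal_changedigt : Prop := ∀ (n : Int) (c : List Int), Dom_changedigt n c → Pre_changedigt n c → Spec_changedigt n c (changedigt n c)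

-- ===== LEMMAS AND PROOFS =====

-- Python ''.join is list flatten
theorem pv_join_nil_eq_flatten (ps : List (List Char)) : PySem.Chars.join [] ps = ps.flatten := by
  induction ps with
  | nil => simp [PySem.Chars.join_nil]
  | cons h t ih =>
    cases t with
    | nil => simp [PySem.Chars.join_singleton]
    | cons b u => rw [PySem.Chars.join_cons_cons]; simp [ih]

-- Python reduce(+) over strings is list flatten
theorem pv_reduceConcat_eq_flatten (xs : List (List Char)) : pvReduceConcat xs = xs.flatten := by
  cases xs with
  | nil => rfl
  | cons h t => simp [pvReduceConcat, PySem.List.foldl_append_eq_flatten]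

-- an in-range assignment l[i] = v sets position (i % len l)
theorem pv_pySetD_eq_set_mod {a : Type} (l : List a) (i : Int) (v : a)
    (h : PySem.Raise.InRange l.length i) :
    PySem.List.pySetD l i v = l.set (PySem.Int.mod i (l.length : Int)).toNat v := by
  obtain ⟨h1, h2⟩ := h
  have hk : 0 < (l.length : Int) := by omega
  rw [PySem.Int.mod_eq_emod_of_pos hk]
  by_cases hi : 0 ≤ i
  · have he : i % (l.length : Int) = i := Int.emod_eq_of_lt hi h2
    rw [he]
    simp [PySem.List.pySetD, PySem.List.pySet?, PySem.List.pyIdx?, hi, h2]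
  · have hlt : i + (l.length : Int) < l.length := by omega
    have hnn : 0 ≤ i + (l.length : Int) := by omega
    have he : i % (l.length : Int) = i + l.length := by
      have hsh : (i + (l.length : Int)) % (l.length : Int) = i % (l.length : Int) :=
        Int.add_emod_right i (l.length : Int)
      have := Int.emod_eq_of_lt hnn hlt
      omega
    rw [he]
    simp only [PySem.List.pySetD, PySem.List.pySet?, PySem.List.pyIdx?, if_neg hi, if_pos h1,
      Option.map_some, Option.getD_some]
    congr 1
    omega

-- the 'for i in c: l[i] = v' loop, elementwise
theorem pv_inner_get? {a : Type} (c : List Int) (v : a) (l : List a)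
    (hc : ∀ i ∈ c, PySem.Raise.InRange l.length i) (j : Nat) :
    (c.foldl (fun l i => PySem.List.pySetD l i v) l)[j]? =
      if (j : Int) ∈ c.map (fun i => PySem.Int.mod i (l.length : Int)) then some v
      else l[j]? := by
  induction c generalizing l with
  | nil => simp
  | cons i c' ih =>
    have hi := hc i (by simp)
    have hk : 0 < (l.length : Int) := by obtain ⟨h1, h2⟩ := hi; omega
    have hmlt : (PySem.Int.mod i (l.length : Int)).toNat < l.length := by
      have := PySem.Int.mod_lt i hk
      have := PySem.Int.mod_nonneg i hk
      omega
    simp only [List.foldl_cons]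
    rw [pv_pySetD_eq_set_mod l i v hi]
    have hc' : ∀ i' ∈ c', PySem.Raise.InRange
        (l.set (PySem.Int.mod i (l.length : Int)).toNat v).length i' := by
      simp only [List.length_set]
      exact fun i' hi' => hc i' (by simp [hi'])
    rw [ih _ hc']
    simp only [List.length_set, List.map_cons, List.mem_cons, List.getElem?_set]
    have := PySem.Int.mod_nonneg i hk
    by_cases hmem : (j : Int) ∈ c'.map (fun i => PySem.Int.mod i (l.length : Int))
    · simp [hmem]
    · by_cases heq : (j : Int) = PySem.Int.mod i (l.length : Int)
      · have hj : (PySem.Int.mod i (l.length : Int)).toNat = j := by omega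
        simp only [heq, hj]
        simp [hj ▸ hmlt]
      · have hj : (PySem.Int.mod i (l.length : Int)).toNat ≠ j := by omega
        simp [hmem, heq, hj]

-- ===== the common digit list of iteration m =====
-- pvSel ds posL m = the digit list both programs turn into the m-th candidate
def pvSel (ds posL : List Int) (m : Int) : List Int :=
  (PySem.List.enumerate ds).map
    (fun jd => if PySem.Set.contains (PySem.Set.ofList posL) jd.1 then m else jd.2)

theorem pv_sel_get? (ds posL : List Int) (m : Int) (j : Nat) :
    (pvSel ds posL m)[j]? =
      ds[j]?.map (fun d => if (j : Int) ∈ posL then m else d) := by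
  simp only [pvSel, List.getElem?_map, PySem.List.getElem?_enumerate, Option.map_map]
  cases hds : ds[j]? with
  | none => simp
  | some d =>
    simp only [Option.map_some, Function.comp_apply, zero_add]
    by_cases hmem : (j : Int) ∈ posL
    · simp [PySem.Set.mem_ofList, hmem]
    · simp [PySem.Set.mem_ofList, hmem]

-- A's inner loop, started from any list agreeing with ds off the target positions, produces pvSel
theorem pv_step_eq (c ds l : List Int) (m : Int)
    (hlen : l.length = ds.length)
    (hoff : ∀ j : Nat,
      (j : Int) ∉ c.map (fun i => PySem.Int.mod i (ds.length : Int)) → l[j]? = ds[j]?)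
    (hc : ∀ i ∈ c, PySem.Raise.InRange ds.length i) :
    c.foldl (fun l i => PySem.List.pySetD l i m) l =
      pvSel ds (c.map (fun i => PySem.Int.mod i (ds.length : Int))) m := by
  apply List.ext_getElem?
  intro j
  have hc' : ∀ i ∈ c, PySem.Raise.InRange l.length i := by rw [hlen]; exact hc
  rw [pv_inner_get? c m l hc' j, pv_sel_get?, hlen]
  by_cases hmem : (j : Int) ∈ c.map (fun i => PySem.Int.mod i (ds.length : Int))
  · simp only [hmem, if_pos]
    obtain ⟨i, hic, hmi⟩ := List.mem_map.mp hmem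
    have hir := hc i hic
    have hk : 0 < (ds.length : Int) := by obtain ⟨h1, h2⟩ := hir; omega
    have hjlt : j < ds.length := by
      have := PySem.Int.mod_lt i hk
      omega
    simp [List.getElem?_eq_getElem hjlt]
  · simp only [hmem, ite_false, hoff j hmem]
    cases ds[j]? with
    | none => rfl
    | some d => simp

-- pvSel itself agrees with ds off the target positions
theorem pv_sel_off (ds posL : List Int) (m : Int) (j : Nat)
    (hmem : (j : Int) ∉ posL) : (pvSel ds posL m)[j]? = ds[j]? := by
  rw [pv_sel_get?]
  cases ds[j]? <;> simp [hmem]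

-- the value both programs append for digit list xs
def pvVal (xs : List Int) : Int :=
  (PySem.Int.ofChars? ((xs.map PySem.Int.toChars).flatten)).getD 0

-- A's outer loop over any list of m's
theorem pv_outer (c ds : List Int) (ms : List Int) (acc l : List Int)
    (hc : ∀ i ∈ c, PySem.Raise.InRange ds.length i)
    (hlen : l.length = ds.length)
    (hoff : ∀ j : Nat,
      (j : Int) ∉ c.map (fun i => PySem.Int.mod i (ds.length : Int)) → l[j]? = ds[j]?) :
    (ms.foldl
      (fun st m =>
        (st.1 ++ [(PySem.Int.ofChars? (pvReduceConcat
            ((c.foldl (fun l i => PySem.List.pySetD l i m) st.2).map PySem.Int.toChars))).getD 0],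
         c.foldl (fun l i => PySem.List.pySetD l i m) st.2))
      (acc, l)).1 =
    acc ++ ms.map (fun m => pvVal (pvSel ds (c.map (fun i => PySem.Int.mod i (ds.length : Int))) m)) := by
  induction ms generalizing acc l with
  | nil => simp
  | cons m ms' ih =>
    simp only [List.foldl_cons, List.map_cons]
    rw [pv_step_eq c ds l m hlen hoff hc]
    rw [ih _ _ (by simp [pvSel, PySem.List.length_enumerate])
      (fun j hm => pv_sel_off ds _ m j hm)]
    simp [pvVal, pv_reduceConcat_eq_flatten]

-- ===== B-side lemmas: segments + splicing =====

-- B's "seq" built from a nonempty parts list: head, then ++ [m] ++ part for each further part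
def pvSplice (m : Int) (parts : List (List Int)) : List Int :=
  parts.tail.foldl (fun s p => (s ++ [m]) ++ p) parts.headI

theorem pv_segStep_ne_nil (parts : List (List Int)) (dh : Int × Bool) :
    pvSegStep parts dh ≠ [] := by
  unfold pvSegStep; split <;> simp

theorem pv_splice_append_nil (m : Int) (a : List Int) (t : List (List Int)) :
    pvSplice m ((a :: t) ++ [[]]) = pvSplice m (a :: t) ++ [m] := by
  simp [pvSplice, List.foldl_append]

theorem pv_splice_append_last (m : Int) (a : List Int) (t : List (List Int)) (x : List Int) :
    pvSplice m ((a :: t) ++ [x]) = pvSplice m (a :: t) ++ [m] ++ x := by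
  simp [pvSplice, List.foldl_append]

-- extending the last segment appends the digit to the spliced sequence
theorem pv_splice_segStep_false (m d : Int) (parts : List (List Int)) (hne : parts ≠ []) :
    pvSplice m (pvSegStep parts (d, false)) = pvSplice m parts ++ [d] := by
  obtain ⟨a, t, rfl⟩ := List.exists_cons_of_ne_nil hne
  unfold pvSegStep
  simp only [if_neg (by simp : ¬ (d, false).2 = true)]
  cases t using List.reverseRecOn with
  | nil => simp [pvSplice]
  | append_singleton t' x _ =>
    have hdl : (a :: (t' ++ [x])).dropLast = a :: t' := by
      rw [show a :: (t' ++ [x]) = (a :: t') ++ [x] from rfl, List.dropLast_concat]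
    have hgl : (a :: (t' ++ [x])).getLast?.getD [] = x := by
      rw [show a :: (t' ++ [x]) = (a :: t') ++ [x] from rfl, List.getLast?_concat]
      rfl
    rw [hdl, hgl]
    have h1 := pv_splice_append_last m a t' (x ++ [d])
    have h2 := pv_splice_append_last m a t' x
    rw [show a :: t' ++ [x ++ [(d, false).1]] = (a :: t') ++ [x ++ [d]] from rfl, h1,
      show a :: (t' ++ [x]) = (a :: t') ++ [x] from rfl, h2]
    simp

theorem pv_splice_segStep_true (m d : Int) (parts : List (List Int)) (hne : parts ≠ []) :
    pvSplice m (pvSegStep parts (d, true)) = pvSplice m parts ++ [m] := by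
  obtain ⟨a, t, rfl⟩ := List.exists_cons_of_ne_nil hne
  rw [show pvSegStep (a :: t) (d, true) = (a :: t) ++ [[]] from rfl]
  exact pv_splice_append_nil m a t

-- the fold invariant: splicing the accumulated segments replays the processed pairs
theorem pv_splice_fold (m : Int) (dm : List (Int × Bool)) (parts : List (List Int))
    (hne : parts ≠ []) :
    pvSplice m (dm.foldl pvSegStep parts) =
      pvSplice m parts ++ dm.map (fun dh => if dh.2 then m else dh.1) := by
  induction dm generalizing parts with
  | nil => simp
  | cons dh dm' ih =>
    obtain ⟨d, hit⟩ := dh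
    simp only [List.foldl_cons, List.map_cons]
    rw [ih _ (pv_segStep_ne_nil parts (d, hit))]
    cases hit with
    | false => rw [pv_splice_segStep_false m d parts hne]; simp
    | true => rw [pv_splice_segStep_true m d parts hne]; simp

-- zip-with-mask equals pvSel when the mask marks exactly the positions of posL
theorem pv_zip_mask_eq_sel (ds posL : List Int) (mask : List Bool) (m : Int)
    (hlen : mask.length = ds.length)
    (hmask : ∀ j : Nat, j < ds.length → mask[j]? = some (decide ((j : Int) ∈ posL))) :
    (ds.zip mask).map (fun dh => if dh.2 then m else dh.1) = pvSel ds posL m := by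
  apply List.ext_getElem
  · simp [pvSel, PySem.List.length_enumerate, hlen]
  intro j h1 h2
  have hj : j < ds.length := by simp [hlen] at h1; omega
  have hmj : mask[j] = decide ((j : Int) ∈ posL) := by
    have h := hmask j hj
    rwa [List.getElem?_eq_getElem (by omega), Option.some_inj] at h
  have hv : (pvSel ds posL m)[j]? = some (if (j : Int) ∈ posL then m else ds[j]) := by
    rw [pv_sel_get?, List.getElem?_eq_getElem hj]
    rfl
  have hv' := List.getElem?_eq_getElem h2
  rw [hv] at hv'
  have he : (pvSel ds posL m)[j] = if (j : Int) ∈ posL then m else ds[j] :=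
    (Option.some_inj.mp hv').symm
  simp only [List.getElem_map, List.getElem_zip, hmj, he]
  by_cases hmem : (j : Int) ∈ posL <;> simp [hmem]

-- ===== VERDICT (by name: the statement is the Claim_ definitions above) =====
theorem changedigt_spec : Claim_equal_changedigt := by
  intro n c _hdom hpre
  obtain ⟨hn, hrange⟩ := hpre
  unfold Spec_changedigt changedigt changedigt_alt
  have hds : (pvParseDigits n).length = (PySem.Int.toChars n).length := by
    simp [pvParseDigits]
  have hc : ∀ i ∈ c, PySem.Raise.InRange (pvParseDigits n).length i := by
    rw [hds]; exact hrange
  simp only []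
  set ds := pvParseDigits n with hds_def
  set posL := c.map (fun i => PySem.Int.mod i (ds.length : Int)) with hposL
  -- the mask marks exactly posL
  have hmask_len : (c.foldl (fun mk i => PySem.List.pySetD mk i true)
      (List.replicate ds.length false)).length = ds.length := by
    have hs : ∀ {a : Type} (l : List a) (i : Int) (v : a),
        (PySem.List.pySetD l i v).length = l.length := by
      intro a l i v
      simp only [PySem.List.pySetD, PySem.List.pySet?, PySem.List.pyIdx?]
      split <;> split <;> simp
    have : ∀ (cs : List Int) (l : List Bool),
        (cs.foldl (fun mk i => PySem.List.pySetD mk i true) l).length = l.length := by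
      intro cs
      induction cs with
      | nil => intro l; rfl
      | cons i cs' ih =>
        intro l
        simp only [List.foldl_cons, ih, hs]
    rw [this]; simp
  have hmask : ∀ j : Nat, j < ds.length →
      (c.foldl (fun mk i => PySem.List.pySetD mk i true)
        (List.replicate ds.length false))[j]? = some (decide ((j : Int) ∈ posL)) := by
    intro j hj
    have hc' : ∀ i ∈ c, PySem.Raise.InRange (List.replicate ds.length false).length i := by
      simp only [List.length_replicate]; exact hc
    rw [pv_inner_get? c true (List.replicate ds.length false) hc' j]
    simp only [List.length_replicate, ← hposL]
    by_cases hmem : (j : Int) ∈ posL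
    · simp [hmem]
    · simp [hmem, hj]
  -- B's parts list and spliced sequence
  set mask := c.foldl (fun mk i => PySem.List.pySetD mk i true)
    (List.replicate ds.length false) with hmaskdef
  have hzip : ∀ m : Int,
      pvSplice m ((ds.zip mask).foldl pvSegStep [[]]) = pvSel ds posL m := by
    intro m
    rw [pv_splice_fold m (ds.zip mask) [[]] (by simp)]
    rw [pv_zip_mask_eq_sel ds posL mask m hmask_len hmask]
    simp [pvSplice]
  -- rewrite A's foldl with pv_outer
  rw [pv_outer c ds (PySem.List.pyRange 0 10 1) [] ds hc rfl (fun j _ => rfl)]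
  -- rewrite B's foldl into a map
  have hB : ∀ (ms : List Int) (acc : List Int),
      ms.foldl
        (fun result m =>
          result ++ [(PySem.Int.ofChars? (PySem.Chars.join []
            (((PySem.List.slice ((ds.zip mask).foldl pvSegStep [[]]) (some 1) none).foldl
              (fun seq p => (seq ++ [m]) ++ p)
              ((ds.zip mask).foldl pvSegStep [[]]).headI).map PySem.Int.toChars))).getD 0])
        acc =
      acc ++ ms.map (fun m => pvVal (pvSel ds posL m)) := by
    intro ms
    induction ms with
    | nil => intro acc; simp
    | cons m ms' ih =>
      intro acc
      simp only [List.foldl_cons, List.map_cons]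
      rw [ih]
      have hseq : (PySem.List.slice ((ds.zip mask).foldl pvSegStep [[]]) (some 1) none).foldl
          (fun seq p => (seq ++ [m]) ++ p) ((ds.zip mask).foldl pvSegStep [[]]).headI =
          pvSel ds posL m := by
        rw [PySem.List.slice_from_one, ← pvSplice, hzip m]
      rw [hseq, pv_join_nil_eq_flatten]
      simp [pvVal]
  rw [hB]
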